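-- pv_equiv track=rewrite | github.com/NutthanichN/grading-helper | week_6/6110545431_lab6.py | front_x
-- ===== SOURCE A (Python) =====
-- def front_x(x):
--     """
--     Return a list with the strings in sorted order except starts with 'x' first.
--     >>> front_x(['ant','bird','xex'])
--     ['xex', 'ant', 'bird']
--     >>> front_x(['xo','cat','dog','elephant'])
--     ['xo', 'cat', 'dog', 'elephant']
--     >>> front_x(['bring','apple','down','xx','pround'])
--     ['xx', 'apple', 'bring', 'down', 'pround']
--     >>> front_x(['happy','xoxo','yelly','oxes'])
--     ['xoxo', 'happy', 'oxes', 'yelly']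
--     >>> front_x(['xyz','pig','helmet','tree'])
--     ['xyz', 'helmet', 'pig', 'tree']
--     """
--     xlist = []
--     alist = []
--     for word in x:
--         if word.startswith('x'):
--             xlist.append(word)
--         else:
--             alist.append(word)
--     return sorted(xlist) + sorted(alist)
-- ===== SOURCE B (Python) =====
-- def front_x(x):
--     return sorted(x, key=lambda w: (not w.startswith('x'), w))
-- ===== Notes on version B (the rewrite author's own statement) =====
-- stated objective: idiomatic
-- what changed: Replaces the explicit two-list partition loop plus two separate sorted() calls and concatenation with a single stable sort over a composite key (not w.startswith('x'), w).
import Mathlib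
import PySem

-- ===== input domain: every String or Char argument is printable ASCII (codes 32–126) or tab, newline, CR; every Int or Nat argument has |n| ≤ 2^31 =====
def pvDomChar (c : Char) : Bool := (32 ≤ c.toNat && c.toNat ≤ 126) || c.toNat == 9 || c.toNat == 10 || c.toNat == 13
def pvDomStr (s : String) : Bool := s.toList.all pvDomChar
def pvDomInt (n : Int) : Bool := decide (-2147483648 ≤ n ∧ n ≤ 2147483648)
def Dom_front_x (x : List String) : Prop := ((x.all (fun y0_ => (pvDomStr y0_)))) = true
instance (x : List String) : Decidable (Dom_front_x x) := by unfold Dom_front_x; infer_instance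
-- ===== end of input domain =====

-- B replaces A's explicit two-list partition loop + two sorted() calls + concatenation by a
-- single stable sort with the composite key (not w.startswith('x'), w); objective: idiomatic.


-- ===== PORT A =====
-- partition loop with the pair (xlist, alist) as accumulator, then sorted(xlist) + sorted(alist)
def front_x (x : List String) : List String :=
  let st := x.foldl
    (fun (acc : List String × List String) word =>
      if PySem.Str.startswith word "x" then (acc.1 ++ [word], acc.2)
      else (acc.1, acc.2 ++ [word]))
    ([], [])
  PySem.List.sorted st.1 (fun w => w) ++ PySem.List.sorted st.2 (fun w => w)

-- ===== PORT B =====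
-- single stable sort with the tuple key (not w.startswith('x'), w)
def front_x_alt (x : List String) : List String :=
  PySem.List.sorted2 x (fun w => !(PySem.Str.startswith w "x")) (fun w => w)

-- ===== PRECONDITION & SPEC =====
def Spec_front_x (x : List String) (out : List String) : Prop := out = front_x_alt x
instance (x : List String) (out : List String) : Decidable (Spec_front_x x out) := by unfold Spec_front_x; infer_instance

-- ===== CLAIM (what is proved, stated in full; the proofs are below) =====
def Claim_equal_front_x : Prop := ∀ (x : List String), Dom_front_x x → Spec_front_x x (front_x x)

-- ===== LEMMAS AND PROOFS =====

-- the composite key of B, as a single lexicographically ordered key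
def pvKey (w : String) : Bool ×ₗ String := toLex (!(PySem.Str.startswith w "x"), w)

theorem pvKey_injective : Function.Injective pvKey := by
  intro a b h
  have := congrArg (fun p => (ofLex p).2) h
  simpa [pvKey] using this

-- B's pairwise comparison coincides with the strict lex order on pvKey
theorem pv_before_eq (a b : String) :
    (decide ((!(PySem.Str.startswith a "x")) < (!(PySem.Str.startswith b "x"))) ||
      (!decide ((!(PySem.Str.startswith b "x")) < (!(PySem.Str.startswith a "x"))) &&
        decide (a < b)))
      = decide (pvKey a < pvKey b) := by
  cases ha : PySem.Chars.startswith a.toList ['x'] <;>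
    cases hb : PySem.Chars.startswith b.toList ['x'] <;>
      simp [pvKey, Prod.Lex.toLex_lt_toLex, ha, hb]

-- B is the plain sort by the lex key pvKey
theorem front_x_alt_eq_sorted (x : List String) :
    front_x_alt x = PySem.List.sorted x pvKey := by
  rw [PySem.List.sorted_eq_foldl_insertBy]
  simp only [front_x_alt, PySem.List.sorted2]
  congr 1
  funext acc w
  congr 1
  funext a b
  exact pv_before_eq a b

-- A's partition loop computes (filter p, filter !p)
theorem pv_partition (x : List String) (a b : List String) :
    x.foldl
      (fun (acc : List String × List String) word =>
        if PySem.Str.startswith word "x" then (acc.1 ++ [word], acc.2)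
        else (acc.1, acc.2 ++ [word]))
      (a, b)
    = (a ++ x.filter (fun w => PySem.Str.startswith w "x"),
       b ++ x.filter (fun w => !(PySem.Str.startswith w "x"))) := by
  induction x generalizing a b with
  | nil => simp
  | cons w t ih =>
    rw [List.foldl_cons, List.filter_cons, List.filter_cons]
    by_cases h : PySem.Str.startswith w "x" = true
    · rw [if_pos h, ih, if_pos h, if_neg (by simpa using h)]
      simp
    · have h' : PySem.Str.startswith w "x" = false := by simpa using h
      rw [if_neg h, ih, if_neg h, if_pos (by simpa using h')]
      simp

theorem pvKey_le_iff (a b : String) :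
    pvKey a ≤ pvKey b ↔
      ((!(PySem.Str.startswith a "x")) < (!(PySem.Str.startswith b "x")) ∨
       ((!(PySem.Str.startswith a "x")) = (!(PySem.Str.startswith b "x")) ∧ a ≤ b)) := by
  simp [pvKey, Prod.Lex.toLex_le_toLex]

-- ===== VERDICT (by name: the statement is the Claim_ definition above) =====
theorem front_x_spec : Claim_equal_front_x := by
  intro x _
  show front_x x = front_x_alt x
  rw [front_x_alt_eq_sorted, front_x, pv_partition]
  apply PySem.List.eq_of_perm_of_pairwise_le_of_injective pvKey pvKey_injective
  · -- permutation
    refine List.Perm.trans ?_ (PySem.List.sorted_perm x pvKey false).symm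
    refine List.Perm.trans (List.Perm.append (PySem.List.sorted_perm _ _ _)
      (PySem.List.sorted_perm _ _ _)) ?_
    simpa using List.filter_append_perm (fun w => PySem.Str.startswith w "x") x
  · -- the concatenation is pairwise ≤ on pvKey
    rw [List.pairwise_append]
    refine ⟨?_, ?_, ?_⟩
    · refine List.Pairwise.imp_of_mem ?_
        (PySem.List.sorted_pairwise (x.filter (fun w => PySem.Str.startswith w "x")) (fun w => w))
      intro a b ha hb hab
      have ha' : PySem.Str.startswith a "x" = true := by
        have h0 := (PySem.List.mem_sorted _ _ _ _).mp ha
        simpa using (List.mem_filter.mp h0).2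
      have hb' : PySem.Str.startswith b "x" = true := by
        have h0 := (PySem.List.mem_sorted _ _ _ _).mp hb
        simpa using (List.mem_filter.mp h0).2
      rw [pvKey_le_iff]
      exact Or.inr ⟨by rw [ha', hb'], hab⟩
    · refine List.Pairwise.imp_of_mem ?_
        (PySem.List.sorted_pairwise (x.filter (fun w => !(PySem.Str.startswith w "x"))) (fun w => w))
      intro a b ha hb hab
      have ha' : PySem.Str.startswith a "x" = false := by
        have h0 := (PySem.List.mem_sorted _ _ _ _).mp ha
        simpa using (List.mem_filter.mp h0).2
      have hb' : PySem.Str.startswith b "x" = false := by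
        have h0 := (PySem.List.mem_sorted _ _ _ _).mp hb
        simpa using (List.mem_filter.mp h0).2
      rw [pvKey_le_iff]
      exact Or.inr ⟨by rw [ha', hb'], hab⟩
    · intro a ha b hb
      have ha' : PySem.Str.startswith a "x" = true := by
        have h0 := (PySem.List.mem_sorted _ _ _ _).mp ha
        simpa using (List.mem_filter.mp h0).2
      have hb' : PySem.Str.startswith b "x" = false := by
        have h0 := (PySem.List.mem_sorted _ _ _ _).mp hb
        simpa using (List.mem_filter.mp h0).2
      rw [pvKey_le_iff]
      refine Or.inl ?_
      rw [ha', hb']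
      decide
  · exact PySem.List.sorted_pairwise x pvKey
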